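-- pv_equiv track=rewrite | github.com/sglvladi/pyehm | docs/examples/ehm_vs_ehm2_vs_jpda.py | isvalidhyp
-- ===== SOURCE A (Python) =====
-- def isvalidhyp(joint_hyp):
--     used_detections = set()
--     for hyp in joint_hyp:
--         detection = hyp[1]
--         if not detection:
--             pass
--         elif detection in used_detections:
--             return False
--         else:
--             used_detections.add(detection)
--     return True
-- ===== SOURCE B (Python) =====
-- def isvalidhyp(joint_hyp):
--     dets = sorted(hyp[1] for hyp in joint_hyp if hyp[1])
--     return all(a != b for a, b in zip(dets, dets[1:]))
-- ===== Notes on version B (the rewrite author's own statement) =====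
-- stated objective: alternative
-- what changed: Replaces A's incremental hash-set with early exit by a sort-based duplicate check: sort the truthy detections and verify that no two adjacent elements of the sorted list are equal (no set at all).
import Mathlib
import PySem

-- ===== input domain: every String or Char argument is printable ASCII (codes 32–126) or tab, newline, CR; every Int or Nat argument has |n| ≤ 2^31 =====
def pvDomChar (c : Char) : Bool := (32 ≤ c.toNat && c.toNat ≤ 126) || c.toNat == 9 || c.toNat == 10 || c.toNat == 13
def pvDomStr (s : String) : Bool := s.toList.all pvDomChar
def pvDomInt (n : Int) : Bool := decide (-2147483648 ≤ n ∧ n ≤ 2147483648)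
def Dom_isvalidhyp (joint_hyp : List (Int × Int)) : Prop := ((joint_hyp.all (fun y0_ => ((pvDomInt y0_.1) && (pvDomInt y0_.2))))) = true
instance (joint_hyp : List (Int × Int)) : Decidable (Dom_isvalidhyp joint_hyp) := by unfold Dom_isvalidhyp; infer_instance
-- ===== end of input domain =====

-- B replaces A's incremental used-set with early exit by a sort-based duplicate
-- check: sort the truthy detections and  scan adjacent pairs (alternative algorithm).

-- ===== PORT A =====
-- the for-loop of A: state = used_detections; early `return False` = result false
def isvalidhypAux : List (Int × Int) → PySem.Set Int → Bool
  | [], _ => true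
  | hyp :: rest, used =>
      let detection := hyp.2
      if detection == 0 then            -- `if not detection: pass`
        isvalidhypAux rest used
      else if PySem.Set.contains used detection then
        false                           -- `return False`
      else
        isvalidhypAux rest (PySem.Set.add used detection)

def isvalidhyp (joint_hyp : List (Int × Int)) : Bool :=
  isvalidhypAux joint_hyp PySem.Set.empty

-- ===== PORT B =====
def isvalidhyp_alt (joint_hyp : List (Int × Int)) : Bool :=
  -- dets = sorted(hyp[1] for hyp in joint_hyp if hyp[1])
  let dets := PySem.List.sorted
    ((joint_hyp.filter (fun hyp => !(hyp.2 == 0))).map (fun hyp => hyp.2)) (fun x => x) false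
  -- all(a != b for a, b in zip(dets, dets[1:]))  — dets[1:] of a list is its tail
  (dets.zip dets.tail).all (fun p => !(p.1 == p.2))

-- ===== PRECONDITION & SPEC =====
def Spec_isvalidhyp (joint_hyp : List (Int × Int)) (out : Bool) : Prop := out = isvalidhyp_alt joint_hyp
instance (joint_hyp : List (Int × Int)) (out : Bool) : Decidable (Spec_isvalidhyp joint_hyp out) := by unfold Spec_isvalidhyp; infer_instance

-- ===== CLAIM (what is proved, stated in full; the proofs are below) =====
def Claim_equal_isvalidhyp : Prop := ∀ (joint_hyp : List (Int × Int)), Dom_isvalidhyp joint_hyp → Spec_isvalidhyp joint_hyp (isvalidhyp joint_hyp)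

-- ===== LEMMAS AND PROOFS =====

-- the truthy detections of the tail still to process
def pvDets (l : List (Int × Int)) : List Int :=
  (l.filter (fun hyp => !(hyp.2 == 0))).map (fun hyp => hyp.2)

theorem pvDets_cons (h : Int × Int) (t : List (Int × Int)) :
    pvDets (h :: t) = if h.2 = 0 then pvDets t else h.2 :: pvDets t := by
  by_cases hz : h.2 = 0 <;> simp [pvDets, hz]

-- A's loop decides: the remaining truthy detections are nodup and avoid `used`
theorem isvalidhypAux_eq (l : List (Int × Int)) (used : PySem.Set Int) :
    isvalidhypAux l used
      = decide ((pvDets l).Nodup ∧ ∀ d ∈ pvDets l, d ∉ used) := by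
  induction l generalizing used with
  | nil => simp [isvalidhypAux, pvDets]
  | cons h t ih =>
    rw [pvDets_cons]
    by_cases hz : h.2 = 0
    · simp [isvalidhypAux, hz, ih]
    · by_cases hm : h.2 ∈ used
      · simp [isvalidhypAux, hz, hm]
      · simp only [isvalidhypAux, beq_iff_eq, hz, if_false,
          PySem.Set.contains_iff]
        rw [if_neg hm, ih]
        apply decide_eq_decide.mpr
        constructor
        · rintro ⟨hnd, hall⟩
          refine ⟨List.nodup_cons.mpr ⟨fun hmem => ?_, hnd⟩, fun d hd hu => ?_⟩
          · exact hall h.2 hmem (by simp [PySem.Set.mem_add])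
          · rcases List.mem_cons.mp hd with he | hmem
            · exact hm (he ▸ hu)
            · exact hall d hmem (by simp [PySem.Set.mem_add, hu])
        · rintro ⟨hnd, hall⟩
          refine ⟨(List.nodup_cons.mp hnd).2, fun d hd hu => ?_⟩
          rcases (show d ∈ used ∨ d = h.2 by simpa [PySem.Set.mem_add] using hu) with hu' | he
          · exact hall d (List.mem_cons.mpr (Or.inr hd)) hu'
          · exact (List.nodup_cons.mp hnd).1 (he ▸ hd)

-- adjacent-pair scan of B
def pvAdjNe (s : List Int) : Bool := (s.zip s.tail).all (fun p => !(p.1 == p.2))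

theorem pvAdjNe_cons_cons (a b : Int) (t : List Int) :
    pvAdjNe (a :: b :: t) = (!(a == b) && pvAdjNe (b :: t)) := by
  simp [pvAdjNe]

-- on a weakly increasing list, no equal neighbours ⇔ no duplicates at all
theorem pvAdjNe_iff_nodup (s : List Int) (hs : s.Pairwise (· ≤ ·)) :
    pvAdjNe s = true ↔ s.Nodup := by
  induction s with
  | nil => simp [pvAdjNe]
  | cons a t ih =>
    cases t with
    | nil => simp [pvAdjNe]
    | cons b u =>
      have hpw := List.pairwise_cons.mp hs
      rw [pvAdjNe_cons_cons, Bool.and_eq_true, ih hpw.2]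
      constructor
      · rintro ⟨hab, hnd⟩
        refine List.nodup_cons.mpr ⟨fun hmem => ?_, hnd⟩
        have hab' : a ≠ b := by simpa using hab
        have halt : a < b := lt_of_le_of_ne (hpw.1 b (List.mem_cons_self ..)) hab'
        rcases List.mem_cons.mp hmem with he | hmem'
        · exact hab' he
        · have : b ≤ a := (List.pairwise_cons.mp hpw.2).1 a hmem'
          exact absurd (lt_of_lt_of_le halt this) (lt_irrefl a)
      · intro hnd
        have h1 := List.nodup_cons.mp hnd
        refine ⟨?_, h1.2⟩
        simpa using fun he : a = b => h1.1 (by simp [he])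

-- ===== VERDICT (by name: the statement is the Claim_ definition above) =====
theorem isvalidhyp_spec : Claim_equal_isvalidhyp := by
  intro joint_hyp _
  show isvalidhyp joint_hyp = isvalidhyp_alt joint_hyp
  rw [isvalidhyp, isvalidhypAux_eq]
  have halt : isvalidhyp_alt joint_hyp
      = pvAdjNe (PySem.List.sorted (pvDets joint_hyp) (fun x => x) false) := rfl
  rw [halt]
  set s := PySem.List.sorted (pvDets joint_hyp) (fun x => x) false with hsdef
  have hperm : s.Perm (pvDets joint_hyp) := PySem.List.sorted_perm _ _ _
  have hpw : s.Pairwise (fun a b => (fun x => x) a ≤ (fun x => x) b) :=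
    PySem.List.sorted_pairwise (pvDets joint_hyp) (fun x => x)
  have hiff := pvAdjNe_iff_nodup s (by simpa using hpw)
  by_cases hnd : (pvDets joint_hyp).Nodup
  · have hb : pvAdjNe s = true := hiff.mpr (hperm.nodup_iff.mpr hnd)
    simp [hnd, hb, PySem.Set.empty]
  · have hb : pvAdjNe s = false := by
      cases h : pvAdjNe s
      · rfl
      · exact absurd (hperm.nodup_iff.mp (hiff.mp h)) hnd
    simp [hnd, hb]
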